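-- pv_equiv track=rewrite | github.com/feliciatrinh/coding-challenges-and-review | ibm/separating_students.py | min_moves_alt
-- ===== SOURCE A (Python) =====
-- def min_moves_alt(avg):
--     """
--     Runtime: O(N), Space: O(1)
--     """
--     num_zeros = 0
--     left_moves = 0
--     for digit in avg:
--         if digit == 1:
--             left_moves += num_zeros
--         else:
--             num_zeros += 1
--
--     num_zeros = 0
--     right_moves = 0
--     for digit in avg[::-1]:
--         if digit == 1:
--             right_moves += num_zeros
--         else:
--             num_zeros += 1
--     return min(left_moves, right_moves)
-- ===== SOURCE B (Python) =====
-- def min_moves_alt(avg):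
--     # One forward pass: left_moves plus zero/one counters; right_moves is
--     # derived arithmetically (every 0/1 pair is counted by exactly one side).
--     num_zeros = 0
--     num_ones = 0
--     left_moves = 0
--     for digit in avg:
--         if digit == 1:
--             left_moves += num_zeros
--             num_ones += 1
--         else:
--             num_zeros += 1
--     right_moves = num_zeros * num_ones - left_moves
--     return min(left_moves, right_moves)
-- ===== Notes on version B (the rewrite author's own statement) =====
-- stated objective: simpler
-- what changed: B makes a single forward pass (tracking zeros, ones and left_moves) and computes right_moves arithmetically as num_zeros*num_ones - left_moves, removing A's list reversal and second scan.
import Mathlib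
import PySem

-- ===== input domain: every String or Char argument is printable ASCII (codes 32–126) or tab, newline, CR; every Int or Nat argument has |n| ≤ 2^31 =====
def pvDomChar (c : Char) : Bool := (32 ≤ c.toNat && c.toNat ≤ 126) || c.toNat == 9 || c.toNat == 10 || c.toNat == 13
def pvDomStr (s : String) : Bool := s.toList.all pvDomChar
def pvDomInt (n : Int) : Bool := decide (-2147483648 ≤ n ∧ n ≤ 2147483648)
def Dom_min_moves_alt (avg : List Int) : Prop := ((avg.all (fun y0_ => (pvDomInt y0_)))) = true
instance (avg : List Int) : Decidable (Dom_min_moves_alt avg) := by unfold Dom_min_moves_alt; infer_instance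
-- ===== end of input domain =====

-- B replaces A's second (reversed) scan by a single forward pass plus the identity
-- right_moves = num_zeros * num_ones - left_moves; objective: simpler.

-- ===== PORT A =====
def min_moves_alt (avg : List Int) : Int :=
  -- first loop: (num_zeros, left_moves)
  let st₁ := avg.foldl
    (fun (st : Int × Int) digit =>
      if digit = 1 then (st.1, st.2 + st.1) else (st.1 + 1, st.2)) (0, 0)
  -- second loop over avg[::-1]: (num_zeros, right_moves)
  let rev := (PySem.List.slice? avg none none (-1)).getD []
  let st₂ := rev.foldl
    (fun (st : Int × Int) digit =>
      if digit = 1 then (st.1, st.2 + st.1) else (st.1 + 1, st.2)) (0, 0)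
  min st₁.2 st₂.2

-- ===== PORT B =====
def min_moves_alt_alt (avg : List Int) : Int :=
  -- one pass: (num_zeros, num_ones, left_moves)
  let st := avg.foldl
    (fun (st : Int × Int × Int) digit =>
      if digit = 1 then (st.1, st.2.1 + 1, st.2.2 + st.1)
      else (st.1 + 1, st.2.1, st.2.2)) (0, 0, 0)
  let rightMoves := st.1 * st.2.1 - st.2.2
  min st.2.2 rightMoves

-- ===== PRECONDITION & SPEC =====
def Spec_min_moves_alt (avg : List Int) (out : Int) : Prop := out = min_moves_alt_alt avg
instance (avg : List Int) (out : Int) : Decidable (Spec_min_moves_alt avg out) := by unfold Spec_min_moves_alt; infer_instance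

-- ===== CLAIM (what is proved, stated in full; the proofs are below) =====
def Claim_equal_min_moves_alt : Prop := ∀ (avg : List Int), Dom_min_moves_alt avg → Spec_min_moves_alt avg (min_moves_alt avg)

-- ===== LEMMAS AND PROOFS =====

/-- number of non-1 entries ("zeros" in A's sense) -/
def pvZ : List Int → Int
  | [] => 0
  | d :: t => (if d = 1 then 0 else 1) + pvZ t

/-- number of entries equal to 1 -/
def pvO : List Int → Int
  | [] => 0
  | d :: t => (if d = 1 then 1 else 0) + pvO t

/-- left_moves from a fresh start: for each non-1, the ones after it -/
def pvL : List Int → Int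
  | [] => 0
  | d :: t => (if d = 1 then 0 else pvO t) + pvL t

theorem pvFoldA (l : List Int) : ∀ z r : Int,
    l.foldl (fun (st : Int × Int) digit =>
      if digit = 1 then (st.1, st.2 + st.1) else (st.1 + 1, st.2)) (z, r)
    = (z + pvZ l, r + z * pvO l + pvL l) := by
  induction l with
  | nil => intro z r; simp [pvZ, pvO, pvL]
  | cons d t ih =>
    intro z r
    by_cases h : d = 1
    · rw [List.foldl_cons]; simp only [if_pos h, ih]
      rw [Prod.mk.injEq]; constructor
      · simp [pvZ, h]
      · simp [pvO, pvL, h]; ring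
    · rw [List.foldl_cons]; simp only [if_neg h, ih]
      rw [Prod.mk.injEq]; constructor
      · simp [pvZ, h]; ring
      · simp [pvO, pvL, h]; ring

theorem pvFoldB (l : List Int) : ∀ z o r : Int,
    l.foldl (fun (st : Int × Int × Int) digit =>
      if digit = 1 then (st.1, st.2.1 + 1, st.2.2 + st.1)
      else (st.1 + 1, st.2.1, st.2.2)) (z, o, r)
    = (z + pvZ l, o + pvO l, r + z * pvO l + pvL l) := by
  induction l with
  | nil => intro z o r; simp [pvZ, pvO, pvL]
  | cons d t ih =>
    intro z o r
    by_cases h : d = 1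
    · rw [List.foldl_cons]; simp only [if_pos h, ih]
      rw [Prod.mk.injEq, Prod.mk.injEq]
      refine ⟨by simp [pvZ, h], by simp [pvO, h]; ring, by simp [pvO, pvL, h]; ring⟩
    · rw [List.foldl_cons]; simp only [if_neg h, ih]
      rw [Prod.mk.injEq, Prod.mk.injEq]
      refine ⟨by simp [pvZ, h]; ring, by simp [pvO, h], by simp [pvO, pvL, h]; ring⟩

theorem pvO_append (xs : List Int) (d : Int) :
    pvO (xs ++ [d]) = pvO xs + (if d = 1 then 1 else 0) := by
  induction xs with
  | nil => simp [pvO]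
  | cons x t ih => simp [pvO, ih]; ring_nf

theorem pvZ_append (xs : List Int) (d : Int) :
    pvZ (xs ++ [d]) = pvZ xs + (if d = 1 then 0 else 1) := by
  induction xs with
  | nil => simp [pvZ]
  | cons x t ih => simp [pvZ, ih]; ring_nf

theorem pvL_append (xs : List Int) (d : Int) :
    pvL (xs ++ [d]) = pvL xs + (if d = 1 then pvZ xs else 0) := by
  induction xs with
  | nil => simp [pvL, pvZ, pvO]
  | cons x t ih =>
    simp [pvL, pvO_append, pvZ, ih]
    by_cases h : d = 1
    · by_cases h' : x = 1 <;> simp [h, h'] <;> ring_nf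
    · by_cases h' : x = 1 <;> simp [h, h']

theorem pvZ_reverse (l : List Int) : pvZ l.reverse = pvZ l := by
  induction l with
  | nil => rfl
  | cons d t ih => simp [pvZ, pvZ_append, ih]; ring_nf

theorem pvL_rev_add (l : List Int) : pvL l.reverse + pvL l = pvZ l * pvO l := by
  induction l with
  | nil => simp [pvL, pvZ, pvO]
  | cons d t ih =>
    simp [pvL, pvZ, pvO, pvL_append, pvZ_reverse]
    by_cases h : d = 1 <;> simp [h] <;> linarith [ih]

-- ===== VERDICT (by name: the statement is the Claim_ definition above) =====
theorem min_moves_alt_spec : Claim_equal_min_moves_alt := by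
  intro avg _
  unfold Spec_min_moves_alt min_moves_alt min_moves_alt_alt
  rw [PySem.List.slice?_none_none_neg_one]
  simp [pvFoldA, pvFoldB, -List.foldl_reverse]
  have h := pvL_rev_add avg
  have hrev : pvL avg.reverse = pvZ avg * pvO avg - pvL avg := by linarith
  rw [hrev]
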